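-- pv_equiv track=rewrite | github.com/ep-eaglepoint-ai/bd_datasets_002 | j1w9qv-nearest-neighbor/evaluation/evaluation.py | map_criteria
-- ===== SOURCE A (Python) =====
-- def map_criteria(tests):
--     """
--     Maps specific KD-Tree test names to the architectural criteria
--     defined in the task requirements.
--     """
--     def check(name_fragment):
--         for t in tests:
--             if name_fragment in t["name"]:
--                 return "Pass" if t["outcome"] == "passed" else "Fail"
--         return "Not Run"
--
--     # Mapping requirements to specific test functions
--     return {
--         # Requirement 1 & 3: Median selection O(n) & Balanced Tree
--         "time_complexity_construction": check("test_median_selection_and_tree_balance"),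
--
--         # Requirement 2: Minimize memory allocations (in-place)
--         "memory_efficiency": check("test_memory_allocations"),
--
--         # Requirement 4: High-dimensional data support
--         "high_dimensionality": check("test_high_dimensional_data"),
--
--         # Requirement 5: Optimized math (no sqrt in loops)
--         "math_optimization": check("test_distance_calculations"),
--
--         # Requirement 6: Effective branch pruning
--         "search_pruning": check("test_branch_pruning"),
--
--         # Requirement 7: Robustness / Correctness
--         "basic_correctness": check("test_basic_correctness"),
--         "edge_case_robustness": check("test_edge_cases")
--     }
-- ===== SOURCE B (Python) =====
-- PAIRS = [
--     ("test_median_selection_and_tree_balance", "time_complexity_construction"),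
--     ("test_memory_allocations", "memory_efficiency"),
--     ("test_high_dimensional_data", "high_dimensionality"),
--     ("test_distance_calculations", "math_optimization"),
--     ("test_branch_pruning", "search_pruning"),
--     ("test_basic_correctness", "basic_correctness"),
--     ("test_edge_cases", "edge_case_robustness"),
-- ]
--
--
-- def map_criteria(tests):
--     results = {key: "Not Run" for _, key in PAIRS}
--     for t in tests:
--         name = t["name"]
--         for frag, key in PAIRS:
--             if results[key] == "Not Run" and frag in name:
--                 results[key] = "Pass" if t["outcome"] == "passed" else "Fail"
--     return results
-- ===== Notes on version B (the rewrite author's own statement) =====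
-- stated objective: alternative
-- what changed: A rescans the whole test list once per criterion (seven independent first-match scans); B makes a single pass over the tests with a (fragment, key) table, filling each still-unset criterion at its first matching test.
import Mathlib
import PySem

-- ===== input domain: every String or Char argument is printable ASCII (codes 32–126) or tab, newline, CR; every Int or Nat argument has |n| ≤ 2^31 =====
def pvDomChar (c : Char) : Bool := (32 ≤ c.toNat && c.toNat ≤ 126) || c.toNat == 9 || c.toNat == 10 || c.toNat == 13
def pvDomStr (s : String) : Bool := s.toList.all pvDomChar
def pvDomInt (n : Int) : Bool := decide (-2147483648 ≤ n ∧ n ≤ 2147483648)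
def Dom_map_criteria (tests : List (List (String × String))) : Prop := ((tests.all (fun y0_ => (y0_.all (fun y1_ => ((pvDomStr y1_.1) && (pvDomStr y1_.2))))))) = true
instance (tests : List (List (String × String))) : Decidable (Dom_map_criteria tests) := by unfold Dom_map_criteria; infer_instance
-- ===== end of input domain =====

-- B replaces A's seven independent rescans of `tests` with one table-driven pass that fills
-- every still-unset criterion at a test's first match (objective: alternative decomposition).

-- ===== PORT A =====
-- the inner closure `check(name_fragment)`: first test whose name contains the fragment
-- (missing-key lookups are excluded by Pre_; the port reads them with default "")
def pvCheck (tests : List (List (String × String))) (frag : String) : String :=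
  match tests with
  | [] => "Not Run"
  | t :: ts =>
    if PySem.Str.isIn frag ((PySem.Dict.mk t).getD "name" "") then
      (if (PySem.Dict.mk t).getD "outcome" "" == "passed" then "Pass" else "Fail")
    else pvCheck ts frag

def map_criteria (tests : List (List (String × String))) : List (String × String) :=
  [("time_complexity_construction", pvCheck tests "test_median_selection_and_tree_balance"),
   ("memory_efficiency", pvCheck tests "test_memory_allocations"),
   ("high_dimensionality", pvCheck tests "test_high_dimensional_data"),
   ("math_optimization", pvCheck tests "test_distance_calculations"),
   ("search_pruning", pvCheck tests "test_branch_pruning"),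
   ("basic_correctness", pvCheck tests "test_basic_correctness"),
   ("edge_case_robustness", pvCheck tests "test_edge_cases")]

-- ===== PORT B =====
def pvPairs : List (String × String) :=
  [("test_median_selection_and_tree_balance", "time_complexity_construction"),
   ("test_memory_allocations", "memory_efficiency"),
   ("test_high_dimensional_data", "high_dimensionality"),
   ("test_distance_calculations", "math_optimization"),
   ("test_branch_pruning", "search_pruning"),
   ("test_basic_correctness", "basic_correctness"),
   ("test_edge_cases", "edge_case_robustness")]

-- the body of the inner `for frag, key in pairs:` loop
def pvInner (t : List (String × String)) (d : PySem.Dict String String) (p : String × String) : PySem.Dict String String :=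
  if (d.getD p.2 "" == "Not Run") && PySem.Str.isIn p.1 ((PySem.Dict.mk t).getD "name" "") then
    d.insert p.2 (if (PySem.Dict.mk t).getD "outcome" "" == "passed" then "Pass" else "Fail")
  else d

-- the body of the outer `for t in tests:` loop
def pvStep (t : List (String × String)) (d : PySem.Dict String String) : PySem.Dict String String :=
  pvPairs.foldl (pvInner t) d

def map_criteria_alt (tests : List (List (String × String))) : List (String × String) :=
  (tests.foldl (fun d t => pvStep t d)
    (PySem.Dict.ofList (pvPairs.map (fun p => (p.2, "Not Run"))))).items

-- ===== PRECONDITION & SPEC =====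
-- Pre_ excludes the inputs on which the Python A raises KeyError: a test without a "name"
-- key, or a test whose name contains one of the seven fragments but has no "outcome" key
-- (conservatively including matches shadowed by an earlier match, where A still returns).
def Pre_map_criteria (tests : List (List (String × String))) : Prop :=
  ∀ t ∈ tests, (PySem.Dict.mk t).contains "name" = true ∧
    ((∃ p ∈ pvPairs, PySem.Str.isIn p.1 ((PySem.Dict.mk t).getD "name" "") = true) →
      (PySem.Dict.mk t).contains "outcome" = true)
instance (tests : List (List (String × String))) : Decidable (Pre_map_criteria tests) := by
  unfold Pre_map_criteria; infer_instance

def pvWitness_map_criteria : (List (List (String × String))) :=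
  [[("name", "test_edge_cases"), ("outcome", "passed")], [("name", "zz")]]

def Spec_map_criteria (tests : List (List (String × String))) (out : List (String × String)) : Prop := out = map_criteria_alt tests
instance (tests : List (List (String × String))) (out : List (String × String)) : Decidable (Spec_map_criteria tests out) := by unfold Spec_map_criteria; infer_instance

-- ===== CLAIM (what is proved, stated in full; the proofs are below) =====
def Claim_equal_map_criteria : Prop := ∀ (tests : List (List (String × String))), Dom_map_criteria tests → Pre_map_criteria tests → Spec_map_criteria tests (map_criteria tests)

-- ===== LEMMAS AND PROOFS =====

-- one criterion's update at one test, as performed by B's inner loop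
def pvUpd (t : List (String × String)) (frag a : String) : String :=
  if (a == "Not Run") && PySem.Str.isIn frag ((PySem.Dict.mk t).getD "name" "") then
    (if (PySem.Dict.mk t).getD "outcome" "" == "passed" then "Pass" else "Fail")
  else a

lemma pvInner_1 (t : List (String × String)) (a1 a2 a3 a4 a5 a6 a7 : String) :
    pvInner t (PySem.Dict.mk [("time_complexity_construction", a1), ("memory_efficiency", a2), ("high_dimensionality", a3), ("math_optimization", a4), ("search_pruning", a5), ("basic_correctness", a6), ("edge_case_robustness", a7)]) ("test_median_selection_and_tree_balance", "time_complexity_construction") =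
    PySem.Dict.mk [("time_complexity_construction", pvUpd t "test_median_selection_and_tree_balance" a1), ("memory_efficiency", a2), ("high_dimensionality", a3), ("math_optimization", a4), ("search_pruning", a5), ("basic_correctness", a6), ("edge_case_robustness", a7)] := by
  by_cases h1 : a1 = "Not Run"
  all_goals cases hIn : PySem.Chars.isIn ['t', 'e', 's', 't', '_', 'm', 'e', 'd', 'i', 'a', 'n', '_', 's', 'e', 'l', 'e', 'c', 't', 'i', 'o', 'n', '_', 'a', 'n', 'd', '_', 't', 'r', 'e', 'e', '_', 'b', 'a', 'l', 'a', 'n', 'c', 'e'] (((PySem.Dict.mk t).get? "name").getD "").toList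
  all_goals simp [pvInner, pvUpd, PySem.Dict.getD, PySem.Dict.get?_mk_cons, PySem.Dict.insert,
    PySem.Dict.contains, h1, hIn]

lemma pvInner_2 (t : List (String × String)) (a1 a2 a3 a4 a5 a6 a7 : String) :
    pvInner t (PySem.Dict.mk [("time_complexity_construction", a1), ("memory_efficiency", a2), ("high_dimensionality", a3), ("math_optimization", a4), ("search_pruning", a5), ("basic_correctness", a6), ("edge_case_robustness", a7)]) ("test_memory_allocations", "memory_efficiency") =
    PySem.Dict.mk [("time_complexity_construction", a1), ("memory_efficiency", pvUpd t "test_memory_allocations" a2), ("high_dimensionality", a3), ("math_optimization", a4), ("search_pruning", a5), ("basic_correctness", a6), ("edge_case_robustness", a7)] := by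
  by_cases h1 : a2 = "Not Run"
  all_goals cases hIn : PySem.Chars.isIn ['t', 'e', 's', 't', '_', 'm', 'e', 'm', 'o', 'r', 'y', '_', 'a', 'l', 'l', 'o', 'c', 'a', 't', 'i', 'o', 'n', 's'] (((PySem.Dict.mk t).get? "name").getD "").toList
  all_goals simp [pvInner, pvUpd, PySem.Dict.getD, PySem.Dict.get?_mk_cons, PySem.Dict.insert,
    PySem.Dict.contains, h1, hIn]

lemma pvInner_3 (t : List (String × String)) (a1 a2 a3 a4 a5 a6 a7 : String) :
    pvInner t (PySem.Dict.mk [("time_complexity_construction", a1), ("memory_efficiency", a2), ("high_dimensionality", a3), ("math_optimization", a4), ("search_pruning", a5), ("basic_correctness", a6), ("edge_case_robustness", a7)]) ("test_high_dimensional_data", "high_dimensionality") =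
    PySem.Dict.mk [("time_complexity_construction", a1), ("memory_efficiency", a2), ("high_dimensionality", pvUpd t "test_high_dimensional_data" a3), ("math_optimization", a4), ("search_pruning", a5), ("basic_correctness", a6), ("edge_case_robustness", a7)] := by
  by_cases h1 : a3 = "Not Run"
  all_goals cases hIn : PySem.Chars.isIn ['t', 'e', 's', 't', '_', 'h', 'i', 'g', 'h', '_', 'd', 'i', 'm', 'e', 'n', 's', 'i', 'o', 'n', 'a', 'l', '_', 'd', 'a', 't', 'a'] (((PySem.Dict.mk t).get? "name").getD "").toList
  all_goals simp [pvInner, pvUpd, PySem.Dict.getD, PySem.Dict.get?_mk_cons, PySem.Dict.insert,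
    PySem.Dict.contains, h1, hIn]

lemma pvInner_4 (t : List (String × String)) (a1 a2 a3 a4 a5 a6 a7 : String) :
    pvInner t (PySem.Dict.mk [("time_complexity_construction", a1), ("memory_efficiency", a2), ("high_dimensionality", a3), ("math_optimization", a4), ("search_pruning", a5), ("basic_correctness", a6), ("edge_case_robustness", a7)]) ("test_distance_calculations", "math_optimization") =
    PySem.Dict.mk [("time_complexity_construction", a1), ("memory_efficiency", a2), ("high_dimensionality", a3), ("math_optimization", pvUpd t "test_distance_calculations" a4), ("search_pruning", a5), ("basic_correctness", a6), ("edge_case_robustness", a7)] := by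
  by_cases h1 : a4 = "Not Run"
  all_goals cases hIn : PySem.Chars.isIn ['t', 'e', 's', 't', '_', 'd', 'i', 's', 't', 'a', 'n', 'c', 'e', '_', 'c', 'a', 'l', 'c', 'u', 'l', 'a', 't', 'i', 'o', 'n', 's'] (((PySem.Dict.mk t).get? "name").getD "").toList
  all_goals simp [pvInner, pvUpd, PySem.Dict.getD, PySem.Dict.get?_mk_cons, PySem.Dict.insert,
    PySem.Dict.contains, h1, hIn]

lemma pvInner_5 (t : List (String × String)) (a1 a2 a3 a4 a5 a6 a7 : String) :
    pvInner t (PySem.Dict.mk [("time_complexity_construction", a1), ("memory_efficiency", a2), ("high_dimensionality", a3), ("math_optimization", a4), ("search_pruning", a5), ("basic_correctness", a6), ("edge_case_robustness", a7)]) ("test_branch_pruning", "search_pruning") =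
    PySem.Dict.mk [("time_complexity_construction", a1), ("memory_efficiency", a2), ("high_dimensionality", a3), ("math_optimization", a4), ("search_pruning", pvUpd t "test_branch_pruning" a5), ("basic_correctness", a6), ("edge_case_robustness", a7)] := by
  by_cases h1 : a5 = "Not Run"
  all_goals cases hIn : PySem.Chars.isIn ['t', 'e', 's', 't', '_', 'b', 'r', 'a', 'n', 'c', 'h', '_', 'p', 'r', 'u', 'n', 'i', 'n', 'g'] (((PySem.Dict.mk t).get? "name").getD "").toList
  all_goals simp [pvInner, pvUpd, PySem.Dict.getD, PySem.Dict.get?_mk_cons, PySem.Dict.insert,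
    PySem.Dict.contains, h1, hIn]

lemma pvInner_6 (t : List (String × String)) (a1 a2 a3 a4 a5 a6 a7 : String) :
    pvInner t (PySem.Dict.mk [("time_complexity_construction", a1), ("memory_efficiency", a2), ("high_dimensionality", a3), ("math_optimization", a4), ("search_pruning", a5), ("basic_correctness", a6), ("edge_case_robustness", a7)]) ("test_basic_correctness", "basic_correctness") =
    PySem.Dict.mk [("time_complexity_construction", a1), ("memory_efficiency", a2), ("high_dimensionality", a3), ("math_optimization", a4), ("search_pruning", a5), ("basic_correctness", pvUpd t "test_basic_correctness" a6), ("edge_case_robustness", a7)] := by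
  by_cases h1 : a6 = "Not Run"
  all_goals cases hIn : PySem.Chars.isIn ['t', 'e', 's', 't', '_', 'b', 'a', 's', 'i', 'c', '_', 'c', 'o', 'r', 'r', 'e', 'c', 't', 'n', 'e', 's', 's'] (((PySem.Dict.mk t).get? "name").getD "").toList
  all_goals simp [pvInner, pvUpd, PySem.Dict.getD, PySem.Dict.get?_mk_cons, PySem.Dict.insert,
    PySem.Dict.contains, h1, hIn]

lemma pvInner_7 (t : List (String × String)) (a1 a2 a3 a4 a5 a6 a7 : String) :
    pvInner t (PySem.Dict.mk [("time_complexity_construction", a1), ("memory_efficiency", a2), ("high_dimensionality", a3), ("math_optimization", a4), ("search_pruning", a5), ("basic_correctness", a6), ("edge_case_robustness", a7)]) ("test_edge_cases", "edge_case_robustness") =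
    PySem.Dict.mk [("time_complexity_construction", a1), ("memory_efficiency", a2), ("high_dimensionality", a3), ("math_optimization", a4), ("search_pruning", a5), ("basic_correctness", a6), ("edge_case_robustness", pvUpd t "test_edge_cases" a7)] := by
  by_cases h1 : a7 = "Not Run"
  all_goals cases hIn : PySem.Chars.isIn ['t', 'e', 's', 't', '_', 'e', 'd', 'g', 'e', '_', 'c', 'a', 's', 'e', 's'] (((PySem.Dict.mk t).get? "name").getD "").toList
  all_goals simp [pvInner, pvUpd, PySem.Dict.getD, PySem.Dict.get?_mk_cons, PySem.Dict.insert,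
    PySem.Dict.contains, h1, hIn]

lemma pvStep_seven (t : List (String × String)) (a1 a2 a3 a4 a5 a6 a7 : String) :
    pvStep t (PySem.Dict.mk
      [("time_complexity_construction", a1), ("memory_efficiency", a2),
       ("high_dimensionality", a3), ("math_optimization", a4), ("search_pruning", a5),
       ("basic_correctness", a6), ("edge_case_robustness", a7)]) =
    PySem.Dict.mk
      [("time_complexity_construction", pvUpd t "test_median_selection_and_tree_balance" a1),
       ("memory_efficiency", pvUpd t "test_memory_allocations" a2),
       ("high_dimensionality", pvUpd t "test_high_dimensional_data" a3),
       ("math_optimization", pvUpd t "test_distance_calculations" a4),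
       ("search_pruning", pvUpd t "test_branch_pruning" a5),
       ("basic_correctness", pvUpd t "test_basic_correctness" a6),
       ("edge_case_robustness", pvUpd t "test_edge_cases" a7)] := by
  simp only [pvStep, pvPairs, List.foldl]
  rw [pvInner_1, pvInner_2, pvInner_3, pvInner_4, pvInner_5, pvInner_6, pvInner_7]

-- B's fold, started from any seven-slot table, updates each slot independently
lemma pvFold_seven (tests : List (List (String × String)))
    (a1 a2 a3 a4 a5 a6 a7 : String) :
    tests.foldl (fun d t => pvStep t d)
      (PySem.Dict.mk
        [("time_complexity_construction", a1), ("memory_efficiency", a2),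
         ("high_dimensionality", a3), ("math_optimization", a4), ("search_pruning", a5),
         ("basic_correctness", a6), ("edge_case_robustness", a7)]) =
    PySem.Dict.mk
      [("time_complexity_construction", tests.foldl (fun a t => pvUpd t "test_median_selection_and_tree_balance" a) a1),
       ("memory_efficiency", tests.foldl (fun a t => pvUpd t "test_memory_allocations" a) a2),
       ("high_dimensionality", tests.foldl (fun a t => pvUpd t "test_high_dimensional_data" a) a3),
       ("math_optimization", tests.foldl (fun a t => pvUpd t "test_distance_calculations" a) a4),
       ("search_pruning", tests.foldl (fun a t => pvUpd t "test_branch_pruning" a) a5),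
       ("basic_correctness", tests.foldl (fun a t => pvUpd t "test_basic_correctness" a) a6),
       ("edge_case_robustness", tests.foldl (fun a t => pvUpd t "test_edge_cases" a) a7)] := by
  induction tests generalizing a1 a2 a3 a4 a5 a6 a7 with
  | nil => rfl
  | cons t ts ih => simp only [List.foldl_cons, pvStep_seven, ih]

-- a slot that already holds "Pass"/"Fail" is never overwritten
lemma pvFoldUpd_frozen (tests : List (List (String × String))) (frag a : String)
    (h : a ≠ "Not Run") :
    tests.foldl (fun a t => pvUpd t frag a) a = a := by
  induction tests with
  | nil => rfl
  | cons t ts ih =>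
    have hc : (a == "Not Run") = false := by simpa using h
    simp only [List.foldl_cons]
    rw [show pvUpd t frag a = a from by simp [pvUpd, hc]]
    exact ih

-- B's per-slot fold computes A's first-match scan
lemma pvFoldUpd_eq_check (tests : List (List (String × String))) (frag : String) :
    tests.foldl (fun a t => pvUpd t frag a) "Not Run" = pvCheck tests frag := by
  induction tests with
  | nil => rfl
  | cons t ts ih =>
    simp only [List.foldl_cons, pvCheck]
    by_cases h : PySem.Str.isIn frag ((PySem.Dict.mk t).getD "name" "") = true
    · rw [if_pos h]
      rw [show pvUpd t frag "Not Run" =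
          (if (PySem.Dict.mk t).getD "outcome" "" == "passed" then "Pass" else "Fail") by
        simp only [pvUpd, PySem.Str.isIn_eq] at h ⊢; simp [h]]
      split
      · exact pvFoldUpd_frozen ts frag "Pass" (by decide)
      · exact pvFoldUpd_frozen ts frag "Fail" (by decide)
    · rw [if_neg h]
      rw [show pvUpd t frag "Not Run" = "Not Run" by
        simp only [pvUpd, PySem.Str.isIn_eq] at h ⊢; simp [h]]
      exact ih

-- ===== VERDICT (by name: the statement is the Claim_ definition above) =====
theorem map_criteria_spec : Claim_equal_map_criteria := by
  intro tests _ _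
  unfold Spec_map_criteria map_criteria_alt map_criteria
  have hinit : PySem.Dict.ofList (pvPairs.map (fun p => (p.2, "Not Run"))) =
      PySem.Dict.mk
        [("time_complexity_construction", "Not Run"), ("memory_efficiency", "Not Run"),
         ("high_dimensionality", "Not Run"), ("math_optimization", "Not Run"),
         ("search_pruning", "Not Run"), ("basic_correctness", "Not Run"),
         ("edge_case_robustness", "Not Run")] := by decide
  rw [hinit, pvFold_seven]
  simp only [pvFoldUpd_eq_check]
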